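-- pv_equiv track=rewrite | github.com/cukelli/Algoritmi-i-strukture-podataka- | Resenja drugih vezbi/nadji_sve_minimume.py | solution
-- ===== SOURCE A (Python) =====
-- def solution(niz):
--     min = niz[0]
--     nizRez = []
--     for i in range(len(niz)):
--         if niz[i] < min:
--             min = niz[i]
--     for i in range(len(niz)):
--         if niz[i] == min:
--             nizRez.append(niz[i])
--     return nizRez
-- ===== SOURCE B (Python) =====
-- def solution(niz):
--     min = niz[0]
--     nizRez = []
--     for x in niz:
--         if x < min:
--             min = x
--             nizRez = [x]
--         elif x == min:
--             nizRez.append(x)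
--     return nizRez
-- ===== Notes on version B (the rewrite author's own statement) =====
-- stated objective: simpler
-- what changed: Replaces A's two index-based passes (find minimum, then rescan collecting equals) with a single traversal keeping the current minimum and its occurrence list in sync, resetting the list when a new minimum appears.
import Mathlib
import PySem

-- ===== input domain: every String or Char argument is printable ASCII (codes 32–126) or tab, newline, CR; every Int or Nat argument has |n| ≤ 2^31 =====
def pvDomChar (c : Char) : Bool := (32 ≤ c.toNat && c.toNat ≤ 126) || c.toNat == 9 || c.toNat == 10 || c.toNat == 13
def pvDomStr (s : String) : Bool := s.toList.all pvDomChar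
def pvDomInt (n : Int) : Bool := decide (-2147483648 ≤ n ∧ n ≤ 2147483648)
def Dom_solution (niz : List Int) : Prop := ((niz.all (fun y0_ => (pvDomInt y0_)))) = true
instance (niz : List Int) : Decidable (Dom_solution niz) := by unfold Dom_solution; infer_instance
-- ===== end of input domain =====

-- B replaces A's two passes (min, then rescan) with one pass that keeps the
-- current minimum and its occurrence list in sync (objective: simpler, one pass).


-- ===== PORT A =====
-- min starts at the first element; first loop lowers min; second loop appends every element equal to min.
def solution (niz : List Int) : List Int :=
  match niz with
  | [] => []  -- unreachable under Pre_solution (Python raises IndexError reading the first element)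
  | h :: _ =>
    let m := niz.foldl (fun m x => if x < m then x else m) h
    niz.foldl (fun acc x => if x == m then acc ++ [x] else acc) []

-- ===== PORT B =====
-- single pass: state (min, nizRez); strict drop resets the list, equality appends.
def solution_alt (niz : List Int) : List Int :=
  match niz with
  | [] => []  -- unreachable under Pre_solution
  | h :: _ =>
    (niz.foldl (fun (p : Int × List Int) x =>
        if x < p.1 then (x, [x])
        else if x == p.1 then (p.1, p.2 ++ [x])
        else p) (h, [])).2

-- ===== PRECONDITION & SPEC =====
-- Pre_ excludes the empty list, on which Python raises IndexError reading the first element.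
def Pre_solution (niz : List Int) : Prop := niz ≠ []
instance (niz : List Int) : Decidable (Pre_solution niz) := by unfold Pre_solution; infer_instance
def pvWitness_solution : List Int := ([3, 1, 2, 1])
def Spec_solution (niz : List Int) (out : List Int) : Prop := out = solution_alt niz
instance (niz : List Int) (out : List Int) : Decidable (Spec_solution niz out) := by unfold Spec_solution; infer_instance

-- ===== CLAIM (what is proved, stated in full; the proofs are below) =====
def Claim_equal_solution : Prop := ∀ (niz : List Int), Dom_solution niz → Pre_solution niz → Spec_solution niz (solution niz)

-- ===== LEMMAS AND PROOFS =====

def pvMinF : Int → Int → Int := fun m x => if x < m then x else m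

lemma foldMin_le (l : List Int) (m : Int) : l.foldl pvMinF m ≤ m := by
  induction l generalizing m with
  | nil => simp [List.foldl]
  | cons x l ih =>
    simp only [List.foldl, pvMinF]
    split_ifs with h
    · exact le_trans (ih x) (le_of_lt h)
    · exact ih m

lemma foldA_filter (l : List Int) (m : Int) (acc : List Int) :
    l.foldl (fun acc x => if x == m then acc ++ [x] else acc) acc
      = acc ++ l.filter (fun x => x == m) := by
  induction l generalizing acc with
  | nil => simp [List.foldl]
  | cons x l ih =>
    simp only [List.foldl]
    by_cases h : x = m
    · rw [if_pos (by simp [h]), ih]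
      simp [List.filter, h]
    · rw [if_neg (by simp [h]), ih]
      simp [h]

lemma foldB_inv (l : List Int) (m : Int) (res : List Int) :
    l.foldl (fun (p : Int × List Int) x =>
        if x < p.1 then (x, [x])
        else if x == p.1 then (p.1, p.2 ++ [x])
        else p) (m, res)
      = (l.foldl pvMinF m,
         if l.foldl pvMinF m = m then res ++ l.filter (fun x => x == m)
         else l.filter (fun x => x == l.foldl pvMinF m)) := by
  induction l generalizing m res with
  | nil => simp [List.foldl]
  | cons x l ih =>
    simp only [List.foldl]
    by_cases hlt : x < m
    · rw [if_pos hlt, ih x [x]]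
      have hle : l.foldl pvMinF x ≤ x := foldMin_le l x
      have hne : l.foldl pvMinF x ≠ m := by omega
      have hmf : pvMinF m x = x := by simp [pvMinF, hlt]
      rw [hmf]
      have hxm : (x == m) = false := by simp; omega
      by_cases heq : l.foldl pvMinF x = x
      · simp [heq, show ¬ x = m by omega]
      · have hxne : (x == l.foldl pvMinF x) = false := by simp; omega
        simp [heq, hne, hxne]
    · have hmf : pvMinF m x = m := by simp [pvMinF, hlt]
      by_cases heq : x = m
      · rw [if_neg hlt, if_pos (by simp [heq]), ih m (res ++ [x]), hmf]
        have hle : l.foldl pvMinF m ≤ m := foldMin_le l m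
        by_cases h2 : l.foldl pvMinF m = m
        · simp [h2, heq]
        · have hxne : (x == l.foldl pvMinF m) = false := by simp [heq]; omega
          simp [h2, hxne]
      · rw [if_neg hlt, if_neg (by simp [heq]), ih m res, hmf]
        have hle : l.foldl pvMinF m ≤ m := foldMin_le l m
        by_cases h2 : l.foldl pvMinF m = m
        · have hx : (x == m) = false := by simp [heq]
          simp [h2, hx]
        · have hx : (x == l.foldl pvMinF m) = false := by
            simp
            intro hc
            omega
          simp [h2, hx]

-- ===== VERDICT (by name: the statement is the Claim_ definition above) =====
theorem solution_spec : Claim_equal_solution := by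
  intro niz _ hpre
  unfold Spec_solution solution solution_alt
  match niz with
  | [] => exact absurd rfl hpre
  | h :: t =>
    simp only
    rw [show (fun m x => if x < m then x else m : Int → Int → Int) = pvMinF from rfl]
    rw [foldB_inv, foldA_filter]
    have hhh : pvMinF h h = h := by simp [pvMinF]
    simp only [List.foldl, hhh]
    by_cases heq : t.foldl pvMinF h = h
    · simp [heq]
    · simp [heq]
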